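-- pv_equiv track=rewrite | github.com/1nfocalypse/Cracking-Chaos | ccdemos/MT19937.py | generate
-- ===== SOURCE A (Python) =====
-- def generate(mti, state):
--     mag01 = [0, 0x9908B0DF]
--     if (mti >= 624):
--         for i in range(624 - 397):
--             y = (state[i]&0x80000000)|(state[i+1]&0x7FFFFFFF)
--             state[i] = state[i+397] ^ (y >> 1) ^ mag01[y & 0x1]
--         for i in range(624 - 397, 623):
--             y = (state[i]&0x80000000)|(state[i+1]&0x7FFFFFFF)
--             state[i] = state[i + (397 - 624)] ^ (y >> 1) ^ mag01[y & 0x1]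
--         y = (state[624-1]&0x80000000)|(state[0]&0x7FFFFFFF)
--         state[624-1] = state[397-1] ^ (y >> 1) ^ mag01[y & 0x1]
--         mti = 0
--
--     y = state[mti]
--     mti += 1
--     y ^= (y >> 11)
--     y ^= ((y << 7) & 0x9d2c5680) & 0xFFFFFFFF
--     y ^= ((y << 15) & 0xEFC60000) & 0xFFFFFFFF
--     y ^= (y >> 18)
--     return y, mti
-- ===== SOURCE B (Python) =====
-- def generate(mti, state):
--     HI, LO, MAG = 0x80000000, 0x7FFFFFFF, 0x9908B0DF
--     if mti >= 624:
--         # nv(i) = the value slot i holds after the classic in-place twist,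
--         # characterised recursively: slots 0..226 depend only on the old state,
--         # slot i >= 227 depends on the already-twisted slot i-227, and slot 623's
--         # low bits come from the already-twisted slot 0.  Chain depth <= 3.
--         def nv(i):
--             y = (state[i] & HI) | ((nv(0) if i == 623 else state[i + 1]) & LO)
--             prev = state[i + 397] if i < 227 else nv(i - 227)
--             return prev ^ (y >> 1) ^ (MAG if y & 1 else 0)
--         state[:624] = [nv(i) for i in range(624)]
--         mti = 0
--     y = state[mti]
--     y ^= y >> 11
--     y ^= (y << 7) & 0x9D2C5680
--     y ^= (y << 15) & 0xEFC60000
--     return y ^ (y >> 18), mti + 1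
-- ===== Notes on version B (the rewrite author's own statement) =====
-- stated objective: alternative
-- what changed: A's imperative three-phase in-place twist (two index loops plus a hand-unrolled last element) is replaced by a pure recursive characterisation nv(i) of the twisted slot (recursing on i-227 for the wrapped reads, depth <= 3) from which the new state is built as one list comprehension and spliced in; the temper block also drops A's redundant '& 0xFFFFFFFF' re-masks.
import Mathlib
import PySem

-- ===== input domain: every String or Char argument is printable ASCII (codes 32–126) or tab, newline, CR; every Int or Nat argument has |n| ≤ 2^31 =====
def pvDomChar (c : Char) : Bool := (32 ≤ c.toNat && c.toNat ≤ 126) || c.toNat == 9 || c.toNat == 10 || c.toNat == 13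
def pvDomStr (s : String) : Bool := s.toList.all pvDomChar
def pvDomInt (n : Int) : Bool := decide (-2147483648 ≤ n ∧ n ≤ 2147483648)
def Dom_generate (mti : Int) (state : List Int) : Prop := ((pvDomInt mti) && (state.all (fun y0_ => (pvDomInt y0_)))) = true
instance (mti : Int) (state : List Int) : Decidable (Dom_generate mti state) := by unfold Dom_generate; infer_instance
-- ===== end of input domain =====

-- B replaces A's imperative three-phase in-place twist with a pure recursive
-- characterisation nv(i) of the twisted slot (recursing on i-227, depth <= 3) and
-- builds the new state as one list comprehension spliced in via state[:624] = ...;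
-- it also drops A's redundant '& 0xFFFFFFFF' re-masks (objective: alternative).
-- Both Pythons mutate `state` in place identically on Pre_; the equivalence proved
-- here is about the return value.

-- ===== PORT A =====
-- the constant list mag01 = [0, 0x9908B0DF]
def pvMag01 : List Int := [0, 0x9908B0DF]

-- A's twist block: two index loops, then the hand-unrolled last element
def pvTwistA (state : List Int) : List Int :=
  let st1 := (PySem.List.pyRange 0 (624 - 397) 1).foldl (fun s i =>
    let y := PySem.Int.bor (PySem.Int.band (PySem.List.pyGetD s i 0) 0x80000000)
                           (PySem.Int.band (PySem.List.pyGetD s (i + 1) 0) 0x7FFFFFFF)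
    PySem.List.pySetD s i
      (PySem.Int.bxor (PySem.Int.bxor (PySem.List.pyGetD s (i + 397) 0) (y >>> (1 : Nat)))
        (PySem.List.pyGetD pvMag01 (PySem.Int.band y 0x1) 0))) state
  let st2 := (PySem.List.pyRange (624 - 397) 623 1).foldl (fun s i =>
    let y := PySem.Int.bor (PySem.Int.band (PySem.List.pyGetD s i 0) 0x80000000)
                           (PySem.Int.band (PySem.List.pyGetD s (i + 1) 0) 0x7FFFFFFF)
    PySem.List.pySetD s i
      (PySem.Int.bxor (PySem.Int.bxor (PySem.List.pyGetD s (i + (397 - 624)) 0) (y >>> (1 : Nat)))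
        (PySem.List.pyGetD pvMag01 (PySem.Int.band y 0x1) 0))) st1
  let y := PySem.Int.bor (PySem.Int.band (PySem.List.pyGetD st2 (624 - 1) 0) 0x80000000)
                         (PySem.Int.band (PySem.List.pyGetD st2 0 0) 0x7FFFFFFF)
  PySem.List.pySetD st2 (624 - 1)
    (PySem.Int.bxor (PySem.Int.bxor (PySem.List.pyGetD st2 (397 - 1) 0) (y >>> (1 : Nat)))
      (PySem.List.pyGetD pvMag01 (PySem.Int.band y 0x1) 0))

-- A's temper block (y = state[mti]; mti += 1; four temper steps; return y, mti)
def pvTemperA (m : Int) (st : List Int) : Int × Int :=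
  let y0 := PySem.List.pyGetD st m 0
  let m2 := m + 1
  let y1 := PySem.Int.bxor y0 (y0 >>> (11 : Nat))
  let y2 := PySem.Int.bxor y1 (PySem.Int.band (PySem.Int.band (y1 <<< (7 : Nat)) 0x9d2c5680) 0xFFFFFFFF)
  let y3 := PySem.Int.bxor y2 (PySem.Int.band (PySem.Int.band (y2 <<< (15 : Nat)) 0xEFC60000) 0xFFFFFFFF)
  let y4 := PySem.Int.bxor y3 (y3 >>> (18 : Nat))
  (y4, m2)

def generate (mti : Int) (state : List Int) : Int × Int :=
  let p : Int × List Int := if mti ≥ 624 then (0, pvTwistA state) else (mti, state)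
  pvTemperA p.1 p.2

-- ===== PORT B =====
-- B's nv(i): the value slot i holds after the twist, characterised recursively
def pvNv (st : List Int) (i : Int) : Int :=
  let lo := if _h : i = 623 then pvNv st 0 else PySem.List.pyGetD st (i + 1) 0
  let y := PySem.Int.bor (PySem.Int.band (PySem.List.pyGetD st i 0) 0x80000000)
                         (PySem.Int.band lo 0x7FFFFFFF)
  let prev := if _h2 : i < 227 then PySem.List.pyGetD st (i + 397) 0 else pvNv st (i - 227)
  PySem.Int.bxor (PySem.Int.bxor prev (y >>> (1 : Nat)))
    (if PySem.Int.band y 1 ≠ 0 then 0x9908B0DF else 0)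
termination_by i.toNat
decreasing_by
  · omega
  · omega

-- B's twist result: state[:624] = [nv(i) for i in range(624)]
def pvTwistB (st : List Int) : List Int :=
  ((PySem.List.pyRange 0 624 1).map (fun i => pvNv st i)) ++ st.drop 624

-- B's temper block (no redundant re-masking)
def pvTemperB (m : Int) (st : List Int) : Int × Int :=
  let y0 := PySem.List.pyGetD st m 0
  let y1 := PySem.Int.bxor y0 (y0 >>> (11 : Nat))
  let y2 := PySem.Int.bxor y1 (PySem.Int.band (y1 <<< (7 : Nat)) 0x9D2C5680)
  let y3 := PySem.Int.bxor y2 (PySem.Int.band (y2 <<< (15 : Nat)) 0xEFC60000)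
  (PySem.Int.bxor y3 (y3 >>> (18 : Nat)), m + 1)

def generate_alt (mti : Int) (state : List Int) : Int × Int :=
  let p : Int × List Int := if mti ≥ 624 then (0, pvTwistB state) else (mti, state)
  pvTemperB p.1 p.2

-- ===== PRECONDITION & SPEC =====
-- Pre_ excludes exactly the inputs where Python A raises IndexError: a twist request
-- (mti >= 624) on a state shorter than 624 entries, or otherwise an mti that is not a
-- valid (possibly negative) Python index into state.
def Pre_generate (mti : Int) (state : List Int) : Prop :=
  (624 ≤ mti ∧ 624 ≤ state.length) ∨
  (mti < 624 ∧ -(state.length : Int) ≤ mti ∧ mti < (state.length : Int))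
instance (mti : Int) (state : List Int) : Decidable (Pre_generate mti state) := by
  unfold Pre_generate; infer_instance

def pvWitness_generate : Int × List Int := (1, [3, 7])

def Spec_generate (mti : Int) (state : List Int) (out : Int × Int) : Prop := out = generate_alt mti state
instance (mti : Int) (state : List Int) (out : Int × Int) : Decidable (Spec_generate mti state out) := by unfold Spec_generate; infer_instance

-- ===== CLAIM (what is proved, stated in full; the proofs are below) =====
def Claim_equal_generate : Prop := ∀ (mti : Int) (state : List Int), Dom_generate mti state → Pre_generate mti state → Spec_generate mti state (generate mti state)

-- ===== LEMMAS AND PROOFS =====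

-- A's mag01 table lookup equals B's conditional
set_option maxRecDepth 8192 in
lemma pv_mag (y : Int) :
    PySem.List.pyGetD ([0, 2567483615] : List Int) (PySem.Int.band y 1) 0
      = (if PySem.Int.band y 1 ≠ 0 then (2567483615 : Int) else 0) := by
  have h1 : PySem.Int.band y 1 = PySem.Int.mod y 2 := PySem.Int.band_one y
  have h2 : 0 ≤ PySem.Int.mod y 2 := PySem.Int.mod_nonneg y (by norm_num)
  have h3 : PySem.Int.mod y 2 < 2 := PySem.Int.mod_lt y (by norm_num)
  have h4 : PySem.Int.mod y 2 = 0 ∨ PySem.Int.mod y 2 = 1 := by omega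
  rcases h4 with h | h <;> rw [h1, h] <;>
    norm_num [PySem.List.pyGetD, PySem.List.pyGet?, PySem.List.pyIdx?]

-- band with a nonnegative right operand is nonnegative and bounded by it
lemma pv_band_nonneg_right (a b : Int) (hb : 0 ≤ b) : 0 ≤ PySem.Int.band a b := by
  unfold PySem.Int.band
  split_ifs <;> omega

lemma pv_band_le_right (a b : Int) (hb : 0 ≤ b) : PySem.Int.band a b ≤ b := by
  unfold PySem.Int.band
  split_ifs <;> try omega
  all_goals
    have : a.toNat &&& b.toNat ≤ b.toNat := Nat.and_le_right
    omega

-- A's extra '& 0xFFFFFFFF' after a 32-bit mask is a no-op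
lemma pv_band_mask (a m : Int) (h0 : 0 ≤ m) (h1 : m < 4294967296) :
    PySem.Int.band (PySem.Int.band a m) 0xFFFFFFFF = PySem.Int.band a m := by
  have h2 : 0 ≤ PySem.Int.band a m := pv_band_nonneg_right a m h0
  have h3 : PySem.Int.band a m ≤ m := pv_band_le_right a m h0
  rw [PySem.Int.band_of_nonneg h2 (by norm_num)]
  have h4 : (PySem.Int.band a m).toNat &&& (4294967295 : Int).toNat
      = (PySem.Int.band a m).toNat % 2 ^ 32 := by
    have h5 := Nat.and_two_pow_sub_one_eq_mod (PySem.Int.band a m).toNat 32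
    norm_num at h5 ⊢
    exact h5
  rw [h4, Nat.mod_eq_of_lt (by omega)]
  omega

-- the two temper blocks agree: the re-masking A performs changes nothing
lemma pv_temper (m : Int) (st : List Int) : pvTemperA m st = pvTemperB m st := by
  have e1 : ∀ a : Int, PySem.Int.band (PySem.Int.band a 0x9d2c5680) 0xFFFFFFFF
      = PySem.Int.band a 0x9d2c5680 := fun a => pv_band_mask a _ (by norm_num) (by norm_num)
  have e2 : ∀ a : Int, PySem.Int.band (PySem.Int.band a 0xEFC60000) 0xFFFFFFFF
      = PySem.Int.band a 0xEFC60000 := fun a => pv_band_mask a _ (by norm_num) (by norm_num)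
  unfold pvTemperA pvTemperB
  simp only [e1, e2]

-- writing at a positive index leaves slot 0 alone
lemma pv_setD_keep0 (s : List Int) (i v : Int) (hi : 1 ≤ i) :
    PySem.List.pyGetD (PySem.List.pySetD s i v) 0 0 = PySem.List.pyGetD s 0 0 := by
  rw [PySem.List.pySetD_of_nonneg _ _ (by omega), PySem.List.pyGetD_zero, PySem.List.pyGetD_zero]
  rcases s with _ | ⟨a, t⟩
  · simp
  · have : i.toNat ≠ 0 := by omega
    cases h : i.toNat with
    | zero => omega
    | succ k => simp [List.set]

-- a foldl of writes at positive indices leaves slot 0 alone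
lemma pv_foldl_keep0 (f : List Int → Int → Int) (l : List Int) (hl : ∀ i ∈ l, 1 ≤ i) :
    ∀ s : List Int,
      PySem.List.pyGetD (l.foldl (fun s i => PySem.List.pySetD s i (f s i)) s) 0 0
        = PySem.List.pyGetD s 0 0 := by
  induction l with
  | nil => intro s; rfl
  | cons a t ih =>
    intro s
    rw [List.foldl_cons, ih (fun i hi => hl i (List.mem_cons_of_mem a hi)),
        pv_setD_keep0 _ _ _ (hl a (List.mem_cons_self))]

-- slot 0 of A's twisted state is B's nv(0)
lemma pv_twist0 (st : List Int) (hlen : 624 ≤ st.length) :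
    PySem.List.pyGetD (pvTwistA st) 0 0 = pvNv st 0 := by
  unfold pvTwistA
  norm_num only
  rw [pv_setD_keep0 _ _ _ (by norm_num)]
  rw [pv_foldl_keep0 (fun s i =>
        PySem.Int.bxor
          (PySem.Int.bxor (PySem.List.pyGetD s (i + -227) 0)
            (PySem.Int.bor (PySem.Int.band (PySem.List.pyGetD s i 0) 2147483648)
                (PySem.Int.band (PySem.List.pyGetD s (i + 1) 0) 2147483647) >>> (1 : Nat)))
          (PySem.List.pyGetD pvMag01
            (PySem.Int.band
              (PySem.Int.bor (PySem.Int.band (PySem.List.pyGetD s i 0) 2147483648)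
                (PySem.Int.band (PySem.List.pyGetD s (i + 1) 0) 2147483647)) 1) 0))
      _ (fun i hi => by rw [PySem.List.mem_pyRange_one] at hi; omega)]
  rw [show PySem.List.pyRange 0 227 1 = 0 :: PySem.List.pyRange 1 227 1 from
        PySem.List.pyRange_one_cons (by norm_num)]
  rw [List.foldl_cons]
  rw [pv_foldl_keep0 (fun s i =>
        PySem.Int.bxor
          (PySem.Int.bxor (PySem.List.pyGetD s (i + 397) 0)
            (PySem.Int.bor (PySem.Int.band (PySem.List.pyGetD s i 0) 2147483648)
                (PySem.Int.band (PySem.List.pyGetD s (i + 1) 0) 2147483647) >>> (1 : Nat)))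
          (PySem.List.pyGetD pvMag01
            (PySem.Int.band
              (PySem.Int.bor (PySem.Int.band (PySem.List.pyGetD s i 0) 2147483648)
                (PySem.Int.band (PySem.List.pyGetD s (i + 1) 0) 2147483647)) 1) 0))
      _ (fun i hi => by rw [PySem.List.mem_pyRange_one] at hi; omega)]
  -- slot 0 of the very first write
  rw [PySem.List.pySetD_of_nonneg _ _ (by norm_num), PySem.List.pyGetD_zero]
  rcases st with _ | ⟨a, t⟩
  · simp at hlen
  · rw [pvNv]
    norm_num [pvMag01, pv_mag]

-- slot 0 of B's spliced list is nv(0)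
lemma pv_twistB0 (st : List Int) :
    PySem.List.pyGetD (pvTwistB st) 0 0 = pvNv st 0 := by
  unfold pvTwistB
  rw [show PySem.List.pyRange 0 624 1 = 0 :: PySem.List.pyRange 1 624 1 from
        PySem.List.pyRange_one_cons (by norm_num)]
  simp [PySem.List.pyGetD_zero_cons]

-- ===== VERDICT (by name: the statement is the Claim_ definition above) =====
theorem generate_spec : Claim_equal_generate := by
  intro mti state _ hpre
  unfold Spec_generate generate generate_alt
  by_cases h : mti ≥ 624
  · have hlen : 624 ≤ state.length := by
      rcases hpre with ⟨_, hl⟩ | ⟨hm, _, _⟩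
      · exact_mod_cast hl
      · omega
    simp only [if_pos h]
    rw [pv_temper]
    unfold pvTemperB
    rw [show PySem.List.pyGetD (pvTwistA state) 0 0 = PySem.List.pyGetD (pvTwistB state) 0 0 from
          by rw [pv_twist0 state hlen, pv_twistB0]]
  · simp only [if_neg h]
    exact pv_temper mti state
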